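-- pv_equiv track=rewrite | github.com/DiXionTeil/hw_by_me | Matzo_python/in_work/massives.py | massive_cro_min_max
-- ===== SOURCE A (Python) =====
-- def massive_cro_min_max(min_val: int, n: int):
--     def massive_n(n, min_value):
--         mass_n = f'{abs(min_value)}'
--         # ───── <  если через 1  > ─────
--         # mass_n = f'{abs(min_val) * 2}'
--         # ──────────────────────────────
--         for i in range(min_value + 1, n + 1):
--             mass_n += '\t' + ''.join(str(abs(i)))
--             # ───────── <  если через 1  > ────────────
--             # mass_n += '\t' + ''.join(str(abs(i * 2)))
--             # ─────────────────────────────────────────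
--         return mass_n
--
--     mass = ''
--     for i in range(min_val, n + 1):
--         mass += massive_n(n, min_val) + '\n'
--         n += 1
--         min_val += 1
--     return mass
-- ===== SOURCE B (Python) =====
-- def massive_cro_min_max(min_val: int, n: int):
--     R = n - min_val + 1
--     if R <= 0:
--         return ''
--     vals = [str(abs(min_val + j)) for j in range(2 * R - 1)]
--     return ''.join('\t'.join(vals[k:k + R]) + '\n' for k in range(R))
-- ===== Notes on version B (the rewrite author's own statement) =====
-- stated objective: alternative
-- what changed: Instead of A's nested loops that mutate (min_val, n) and recompute str(abs(i)) cell by cell, B precomputes one flat table of the 2R-1 distinct values and emits each row as a tab-join of a sliding length-R window over that table.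
import Mathlib
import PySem

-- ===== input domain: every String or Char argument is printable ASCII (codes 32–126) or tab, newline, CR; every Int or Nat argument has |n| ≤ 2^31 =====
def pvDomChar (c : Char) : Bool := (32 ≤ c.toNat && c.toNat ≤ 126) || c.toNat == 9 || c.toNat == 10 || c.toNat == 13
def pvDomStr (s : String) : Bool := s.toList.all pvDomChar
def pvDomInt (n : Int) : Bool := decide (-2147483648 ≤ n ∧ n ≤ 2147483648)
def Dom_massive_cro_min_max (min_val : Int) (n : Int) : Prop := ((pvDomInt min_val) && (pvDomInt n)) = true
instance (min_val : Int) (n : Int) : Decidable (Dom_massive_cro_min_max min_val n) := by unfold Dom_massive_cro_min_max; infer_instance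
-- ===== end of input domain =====

-- B replaces A's nested abs-recomputing loops by one precomputed flat value table read through
-- sliding windows joined with '\t' (objective: alternative decomposition, same asymptotic cost).


-- ===== PORT A =====
-- inner helper massive_n(n, min_value): row string built left to right ('' .join(str(abs(i))) kept literally)
def pvA_massive_n (n min_value : Int) : List Char :=
  (PySem.List.pyRange (min_value + 1) (n + 1)).foldl
    (fun mass_n i =>
      mass_n ++ ['\t'] ++ PySem.Chars.join [] ((PySem.Int.toChars |i|).map (fun c => [c])))
    (PySem.Int.toChars |min_value|)

-- outer loop: for i in range(min_val, n+1): mass += massive_n(n, min_val)+'\n'; n += 1; min_val += 1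
def massive_cro_min_max (min_val : Int) (n : Int) : String :=
  String.ofList
    ((PySem.List.pyRange min_val (n + 1)).foldl
      (fun (st : List Char × Int × Int) _ =>
        (st.1 ++ pvA_massive_n st.2.1 st.2.2 ++ ['\n'], st.2.1 + 1, st.2.2 + 1))
      ([], n, min_val)).1

-- ===== PORT B =====
def massive_cro_min_max_alt (min_val : Int) (n : Int) : String :=
  let R := n - min_val + 1
  if R ≤ 0 then "" else
    let vals := (PySem.List.pyRange 0 (2 * R - 1)).map (fun j => PySem.Int.toChars |min_val + j|)
    String.ofList
      (((PySem.List.pyRange 0 R).map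
          (fun k => PySem.Chars.join ['\t'] (PySem.List.slice vals (some k) (some (k + R))) ++ ['\n'])).flatten)

-- ===== PRECONDITION & SPEC =====
def Spec_massive_cro_min_max (min_val : Int) (n : Int) (out : String) : Prop := out = massive_cro_min_max_alt min_val n
instance (min_val : Int) (n : Int) (out : String) : Decidable (Spec_massive_cro_min_max min_val n out) := by unfold Spec_massive_cro_min_max; infer_instance

-- ===== CLAIM (what is proved, stated in full; the proofs are below) =====
def Claim_equal_massive_cro_min_max : Prop := ∀ (min_val : Int) (n : Int), Dom_massive_cro_min_max min_val n → Spec_massive_cro_min_max min_val n (massive_cro_min_max min_val n)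

-- ===== LEMMAS AND PROOFS =====

-- ''.join over the characters of a string is that string
theorem pv_join_nil (l : List Char) :
    PySem.Chars.join [] (l.map (fun c => [c])) = l := by
  induction l with
  | nil => rfl
  | cons c cs ih =>
      cases cs with
      | nil => rfl
      | cons d ds =>
          simpa [PySem.Chars.join, List.intercalate, List.intersperse] using
            (by simpa [PySem.Chars.join, List.intercalate, List.intersperse] using ih)

-- '\t'.join of a nonempty list of parts, spelled as head ++ flatMap of tab-prefixed tails
theorem pv_join_cons (sep x : List Char) (xs : List (List Char)) :
    PySem.Chars.join sep (x :: xs) = x ++ xs.flatMap (fun y => sep ++ y) := by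
  induction xs generalizing x with
  | nil => simp [PySem.Chars.join, List.intercalate]
  | cons z zs ih =>
      simp [PySem.Chars.join, List.intercalate, List.intersperse] at *
      simp [ih]

-- the row produced by A's inner loop, in closed form
theorem pvA_row (a b : Int) :
    pvA_massive_n b a =
      PySem.Int.toChars |a| ++
        (PySem.List.pyRange (a + 1) (b + 1)).flatMap (fun i => ['\t'] ++ PySem.Int.toChars |i|) := by
  unfold pvA_massive_n
  simp only [List.append_assoc, pv_join_nil]
  exact PySem.List.foldl_append_eq_flatMap _ _ _

-- B's joined window, in the same closed form
theorem pvB_row (a b : Int) (h : a ≤ b) :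
    PySem.Chars.join ['\t'] ((PySem.List.pyRange a (b + 1)).map (fun i => PySem.Int.toChars |i|)) =
      PySem.Int.toChars |a| ++
        (PySem.List.pyRange (a + 1) (b + 1)).flatMap (fun i => ['\t'] ++ PySem.Int.toChars |i|) := by
  rw [PySem.List.pyRange_one_cons (by omega)]
  rw [List.map_cons, pv_join_cons]
  simp [List.flatMap_def, Function.comp_def]

-- B's slice of the precomputed table is the mapped range A's inner loop walks
theorem pv_slice_window (min_val R k : Int) (h0 : 0 ≤ k) (h1 : k < R) :
    PySem.List.slice
        ((PySem.List.pyRange 0 (2 * R - 1)).map (fun j => PySem.Int.toChars |min_val + j|))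
        (some k) (some (k + R)) =
      (PySem.List.pyRange (min_val + k) (min_val + k + R)).map (fun i => PySem.Int.toChars |i|) := by
  rw [PySem.List.slice_toNat _ h0 (by omega)]
  apply List.ext_getElem
  · simp [PySem.List.length_pyRange_one]; omega
  · intro i hi₁ hi₂
    have hk : (k.toNat : Int) = k := Int.toNat_of_nonneg h0
    simp only [List.getElem_take, List.getElem_drop, List.getElem_map,
      PySem.List.getElem_pyRange_one]
    congr 2
    push_cast [hk]
    ring

-- A's outer loop with its incremented (n, min_val) state, unrolled to a flat list of rows
theorem pvA_loop (l : List Int) (mass : List Char) (n0 m0 : Int) :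
    ((l.foldl
        (fun (st : List Char × Int × Int) _ =>
          (st.1 ++ pvA_massive_n st.2.1 st.2.2 ++ ['\n'], st.2.1 + 1, st.2.2 + 1))
        (mass, n0, m0)).1) =
      mass ++ ((List.range l.length).map
        (fun k : Nat => pvA_massive_n (n0 + (k : Int)) (m0 + (k : Int)) ++ ['\n'])).flatten := by
  induction l generalizing mass n0 m0 with
  | nil => simp
  | cons x xs ih =>
      simp only [List.foldl_cons]
      rw [ih, List.length_cons, List.range_succ_eq_map, List.map_cons, List.flatten_cons,
        List.map_map]
      simp only [Nat.cast_zero, add_zero, List.append_assoc]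
      congr 3
      congr 1
      apply List.map_congr_left
      intro k _
      simp only [Function.comp_def]
      congr 2 <;> push_cast <;> ring

-- ===== VERDICT (by name: the statement is the Claim_ definition above) =====
theorem massive_cro_min_max_spec : Claim_equal_massive_cro_min_max := by
  intro min_val n _
  unfold Spec_massive_cro_min_max massive_cro_min_max massive_cro_min_max_alt
  by_cases hR : n - min_val + 1 ≤ 0
  · rw [PySem.List.pyRange_one_eq_nil (by omega)]
    simp [hR]
  · simp only [hR, pvA_loop, List.nil_append]
    congr 1
    have hlen : (PySem.List.pyRange min_val (n + 1)).length = (n - min_val + 1).toNat := by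
      simp [PySem.List.length_pyRange_one]; omega
    rw [hlen]
    rw [show PySem.List.pyRange 0 (n - min_val + 1) = (List.range (n - min_val + 1).toNat).map (fun k : Nat => (k : Int)) by
      simpa using PySem.List.pyRange_one 0 (n - min_val + 1)]
    rw [List.map_map]
    congr 1
    apply List.map_congr_left
    intro k hk
    have hkR : (k : Int) < n - min_val + 1 := by
      have h1 := List.mem_range.mp hk
      have h2 : ((n - min_val + 1).toNat : Int) = n - min_val + 1 :=
        Int.toNat_of_nonneg (by omega)
      rw [← h2]
      exact_mod_cast h1
    simp only [Function.comp_def]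
    rw [pv_slice_window min_val (n - min_val + 1) (k : Int) (by positivity) hkR]
    rw [show min_val + (k : Int) + (n - min_val + 1) = (min_val + (k : Int) + (n - min_val + 1) - 1) + 1 by ring]
    rw [pvB_row (min_val + (k : Int)) (min_val + (k : Int) + (n - min_val + 1) - 1) (by omega)]
    rw [pvA_row]
    rw [show min_val + (k : Int) + (n - min_val + 1) - 1 + 1 = n + (k : Int) + 1 by ring]
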